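-- pv_equiv track=rewrite | github.com/NOMADxzy/tryHard | 笔试/yinhang/241119/p1/main.py | findKthTrace
-- ===== SOURCE A (Python) =====
-- def findKthTrace(mystring: str, k: int) -> int:
--     # write code here
--     cnts = {}
--     ans = 0
--     for c in mystring:
--         if c not in cnts:
--             cnts[c] = 0
--         cnts[c] += 1
--
--     for c, cnt in cnts.items():
--         if cnt >= k:
--             ans += 1
--     return ans
-- ===== SOURCE B (Python) =====
-- def findKthTrace(mystring: str, k: int) -> int:
--     # sort, then scan runs of equal characters; count runs of length >= k
--     s = sorted(mystring)
--     ans = 0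
--     i = 0
--     n = len(s)
--     while i < n:
--         j = i + 1
--         while j < n and s[j] == s[i]:
--             j += 1
--         if j - i >= k:
--             ans += 1
--         i = j
--     return ans
-- ===== Notes on version B (the rewrite author's own statement) =====
-- stated objective: alternative
-- what changed: B sorts the string and scans runs of consecutive equal characters (index two-pointer group scan), counting runs of length >= k, instead of A's dict-based counting pass followed by a filter over the dict items.
import Mathlib
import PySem

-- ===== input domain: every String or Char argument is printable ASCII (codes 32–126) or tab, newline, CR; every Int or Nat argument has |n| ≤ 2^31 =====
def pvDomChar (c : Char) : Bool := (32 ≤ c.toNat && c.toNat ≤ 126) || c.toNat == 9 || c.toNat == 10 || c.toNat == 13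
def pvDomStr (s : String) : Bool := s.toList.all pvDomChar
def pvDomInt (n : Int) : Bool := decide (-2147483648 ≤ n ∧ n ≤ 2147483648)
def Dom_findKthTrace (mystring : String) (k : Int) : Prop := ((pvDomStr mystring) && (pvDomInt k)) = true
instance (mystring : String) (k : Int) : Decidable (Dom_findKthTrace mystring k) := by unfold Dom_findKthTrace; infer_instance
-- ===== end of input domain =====

-- B replaces A's dict-count-then-filter with sort + a grouped run scan (alternative algorithm, same result).

-- ===== PORT A =====
-- A: for each c, if c not in cnts insert 0, then cnts[c] += 1; then count entries with cnt >= k.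
def findKthTrace (mystring : String) (k : Int) : Int :=
  let cnts : PySem.Dict Char Int :=
    mystring.toList.foldl (fun d c =>
      let d := if d.contains c then d else d.insert c 0
      d.insert c (d.getD c 0 + 1)) PySem.Dict.empty
  cnts.items.foldl (fun ans p => if p.2 ≥ k then ans + 1 else ans) 0

-- ===== PORT B =====
-- B's inner while loop: length of the run of characters equal to s[i] (j - i - 1 extra steps).
def pvRunLen (h : Char) : List Char → Nat
  | [] => 0
  | c :: rest => if c == h then 1 + pvRunLen h rest else 0

-- B's outer while loop over the sorted list: one step per run, add 1 when the run length >= k.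
def pvCountGroups (k : Int) : List Char → Int
  | [] => 0
  | h :: rest =>
      let m := 1 + pvRunLen h rest
      (if (m : Int) ≥ k then 1 else 0) + pvCountGroups k (rest.drop (pvRunLen h rest))
termination_by l => l.length
decreasing_by simp [List.length_drop]

def findKthTrace_alt (mystring : String) (k : Int) : Int :=
  pvCountGroups k (PySem.List.sorted mystring.toList (fun x => x) false)

-- ===== PRECONDITION & SPEC =====
def Spec_findKthTrace (mystring : String) (k : Int) (out : Int) : Prop := out = findKthTrace_alt mystring k
instance (mystring : String) (k : Int) (out : Int) : Decidable (Spec_findKthTrace mystring k out) := by unfold Spec_findKthTrace; infer_instance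

-- ===== CLAIM (what is proved, stated in full; the proofs are below) =====
def Claim_equal_findKthTrace : Prop := ∀ (mystring : String) (k : Int), Dom_findKthTrace mystring k → Spec_findKthTrace mystring k (findKthTrace mystring k)

-- ===== LEMMAS AND PROOFS =====

-- run length of the equal prefix = takeWhile length
lemma pvRunLen_eq (h : Char) (l : List Char) :
    pvRunLen h l = (l.takeWhile (· == h)).length := by
  induction l with
  | nil => rfl
  | cons c t ih =>
    by_cases hc : c == h <;> simp [pvRunLen, List.takeWhile, hc, ih] <;> omega

lemma pvTakeWhile_all (h : Char) (l : List Char) :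
    ∀ c ∈ l.takeWhile (· == h), c = h := by
  intro c hc
  simpa using List.mem_takeWhile_imp hc

lemma pvNotMem_dropWhile (h : Char) (l : List Char)
    (hs : l.Pairwise (· ≤ ·)) (hh : ∀ x ∈ l, h ≤ x) :
    h ∉ l.dropWhile (· == h) := by
  induction l with
  | nil => simp
  | cons c t ih =>
    rw [List.pairwise_cons] at hs
    by_cases hc : (c == h) = true
    · simp only [List.dropWhile, hc]
      exact ih hs.2 (fun x hx => hh x (List.mem_cons_of_mem _ hx))
    · simp only [List.dropWhile, hc]
      have hne : c ≠ h := fun e => hc (by simp [e])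
      have hlt : h < c := lt_of_le_of_ne (hh c (List.mem_cons_self)) (Ne.symm hne)
      intro hmem
      rcases List.mem_cons.1 hmem with e | hmt
      · exact hne e.symm
      · exact absurd (hs.1 h hmt) (not_le_of_gt hlt)

lemma pvDrop (p : Char → Bool) (l : List Char) : l.drop (l.takeWhile p).length = l.dropWhile p := by
  induction l with
  | nil => rfl
  | cons c t ih =>
    by_cases hc : p c <;> simp [List.takeWhile, List.dropWhile, hc, ih]

-- main invariant: on a pairwise-≤ list the run scan counts the distinct chars with count ≥ k
lemma pvCountGroups_eq (k : Int) (ys : List Char) (hs : ys.Pairwise (· ≤ ·)) :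
    pvCountGroups k ys =
      ((PySem.Set.ofList ys).countP (fun c => k ≤ (ys.count c : Int)) : Int) := by
  induction ys using pvCountGroups.induct with
  | case1 => simp [pvCountGroups, PySem.Set.ofList]
  | case2 h rest ih =>
    rw [List.pairwise_cons] at hs
    have hpre := pvTakeWhile_all h rest
    have hdrop : h ∉ rest.dropWhile (· == h) := pvNotMem_dropWhile h rest hs.2 hs.1
    have hsplit : rest.takeWhile (· == h) ++ rest.dropWhile (· == h) = rest :=
      List.takeWhile_append_dropWhile
    set pre := rest.takeWhile (· == h) with hpredef
    set suf := rest.dropWhile (· == h) with hsufdef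
    have hdropEq : rest.drop (pvRunLen h rest) = suf := by
      rw [pvRunLen_eq, hsufdef, pvDrop]
    have hsufPW : suf.Pairwise (· ≤ ·) := hs.2.sublist (List.dropWhile_sublist _)
    have hcount_h : ((h :: rest).count h) = 1 + pre.length := by
      rw [← hsplit, List.count_cons_self, List.count_append]
      have h1 : pre.count h = pre.length := by
        rw [List.count_eq_length]; intro b hb; exact ((hpre b hb).symm ▸ rfl)
      have h2 : suf.count h = 0 := List.count_eq_zero.2 hdrop
      omega
    have hcount_other : ∀ c ∈ PySem.Set.ofList suf,
        ((fun c => decide (k ≤ ((List.count c (h :: rest) : Nat) : Int))) c = true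
          ↔ (fun c => decide (k ≤ ((List.count c suf : Nat) : Int))) c = true) := by
      intro c hc
      have hcs : c ∈ suf := (PySem.Set.mem_ofList _ _).1 hc
      have hch : c ≠ h := fun e => hdrop (e ▸ hcs)
      have : (h :: rest).count c = suf.count c := by
        rw [← hsplit, List.count_cons_of_ne hch.symm, List.count_append]
        have : pre.count c = 0 := by
          rw [List.count_eq_zero]; intro hcp; exact hch (hpre c hcp)
        omega
      simp [this]
    have hperm : (PySem.Set.ofList (h :: rest)).Perm (h :: PySem.Set.ofList suf) := by
      rw [List.perm_ext_iff_of_nodup (PySem.Set.nodup_ofList (h :: rest))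
        (List.nodup_cons.2 ⟨fun hm => hdrop ((PySem.Set.mem_ofList _ _).1 hm),
          PySem.Set.nodup_ofList suf⟩)]
      intro a
      simp only [PySem.Set.mem_ofList, List.mem_cons]
      constructor
      · rintro (e | hm)
        · exact Or.inl e
        · rw [← hsplit] at hm
          rcases List.mem_append.1 hm with hp | hsf
          · exact Or.inl (hpre a hp)
          · exact Or.inr hsf
      · rintro (e | hm)
        · exact Or.inl e
        · exact Or.inr (by rw [← hsplit]; exact List.mem_append_right _ hm)
    rw [pvCountGroups]
    rw [hdropEq] at ih ⊢
    rw [ih hsufPW, hperm.countP_eq, List.countP_cons,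
        List.countP_congr hcount_other, hcount_h, pvRunLen_eq, ← hpredef]
    push_cast
    split_ifs with h1 h2 h2 <;> simp_all <;> omega

-- A's counting loop is exactly the insert-getD counter loop.
lemma pvA_counter (xs : List Char) :
    xs.foldl (fun d c =>
      let d := if d.contains c then d else d.insert c 0
      d.insert c (d.getD c 0 + 1)) PySem.Dict.empty = PySem.Dict.counter xs := by
  rw [← PySem.Dict.foldl_insert_getD_add_one_eq_counter]
  apply PySem.List.foldl_congr_mem
  intro d c _
  by_cases hc : d.contains c = true
  · simp [hc]
  · have hcf : d.contains c = false := by simpa using hc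
    simp only [hcf, Bool.false_eq_true, if_false]
    rw [PySem.Dict.insert_insert_self, PySem.Dict.getD_insert_self,
        PySem.Dict.getD_of_not_contains (h := hcf)]

lemma pvA_eq_countP (mystring : String) (k : Int) :
    findKthTrace mystring k =
      ((PySem.Set.ofList mystring.toList).countP
        (fun c => decide (k ≤ ((List.count c mystring.toList : Nat) : Int))) : Int) := by
  unfold findKthTrace
  simp only [pvA_counter]
  rw [PySem.List.foldl_ite_add_one, PySem.Dict.items_counter, List.countP_map]
  simp [ge_iff_le]
  rw [List.countP_congr]
  intro x _
  simp

lemma pvB_eq_countP (mystring : String) (k : Int) :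
    findKthTrace_alt mystring k =
      ((PySem.Set.ofList mystring.toList).countP
        (fun c => decide (k ≤ ((List.count c mystring.toList : Nat) : Int))) : Int) := by
  unfold findKthTrace_alt
  have hperm : (PySem.List.sorted mystring.toList (fun x => x) false).Perm mystring.toList :=
    PySem.List.sorted_perm _ _ _
  have hpw : (PySem.List.sorted mystring.toList (fun x => x) false).Pairwise (· ≤ ·) :=
    PySem.List.sorted_pairwise _ _
  rw [pvCountGroups_eq _ _ hpw]
  have hsets : (PySem.Set.ofList (PySem.List.sorted mystring.toList (fun x => x) false)).Perm
      (PySem.Set.ofList mystring.toList) := by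
    rw [List.perm_ext_iff_of_nodup (PySem.Set.nodup_ofList _) (PySem.Set.nodup_ofList _)]
    intro a
    simp only [PySem.Set.mem_ofList]
    exact hperm.mem_iff
  rw [hsets.countP_eq, List.countP_congr]
  intro c _
  simp [hperm.count_eq]

-- ===== VERDICT (by name: the statement is the Claim_ definition above) =====
theorem findKthTrace_spec : Claim_equal_findKthTrace := by
  intro mystring k _
  unfold Spec_findKthTrace
  rw [pvA_eq_countP, pvB_eq_countP]
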